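-- pv_equiv track=rewrite | github.com/teknolojikpanda/ubuntu_repo_fetcher | src/debian_version.py | _compare_version_part
-- ===== SOURCE A (Python) =====
-- def _compare_version_part(part1, part2):
--     """
--     Compares two parts (upstream or revision) of a Debian version string.
--     Handles digits and non-digits, and the tilde '~'.
--     Returns: -1 if part1 < part2, 0 if part1 == part2, 1 if part1 > part2
--     Based on dpkg/lib/vercmp.c logic.
--     """
--     if part1 is None: part1 = ""
--     if part2 is None: part2 = ""
--
--     i, j = 0, 0
--     len1, len2 = len(part1), len(part2)
--
--     while i < len1 or j < len2:
--         first_diff = 0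
--
--         # Compare non-digit sequences lexicographically
--         start_i, start_j = i, j
--         while i < len1 and not part1[i].isdigit(): i += 1
--         while j < len2 and not part2[j].isdigit(): j += 1
--
--         substr1 = part1[start_i:i]
--         substr2 = part2[start_j:j]
--
--         # '~' sorts before anything, even empty string represented by None comparison later
--         # Replace tilde with a character that sorts very early. Null byte works well.
--         cmp1 = substr1.replace('~', '\x00')
--         cmp2 = substr2.replace('~', '\x00')
--
--         if cmp1 < cmp2: return -1
--         if cmp1 > cmp2: return 1
--
--         # Compare digit sequences numerically
--         start_i, start_j = i, j
--         while i < len1 and part1[i].isdigit(): i += 1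
--         while j < len2 and part2[j].isdigit(): j += 1
--
--         val1_str = part1[start_i:i]
--         val2_str = part2[start_j:j]
--
--         val1 = int(val1_str) if val1_str else 0
--         val2 = int(val2_str) if val2_str else 0
--
--         if val1 < val2: return -1
--         if val1 > val2: return 1
--
--         # If numbers are equal, length might matter implicitly but Python's int handles leading zeros.
--         # Let's assume numerical equality is sufficient here unless specific edge cases arise.
--
--     # If we exit the loop, the parts are identical
--     return 0
-- ===== SOURCE B (Python) =====
-- def _tokens(s):
--     """Scan s into a list of (non-digit run with '~'->'\x00', numeric value of digit run) tokens."""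
--     toks = []
--     i, n = 0, len(s)
--     while i < n:
--         j = i
--         while j < n and not s[j].isdigit():
--             j += 1
--         k = j
--         while k < n and s[k].isdigit():
--             k += 1
--         toks.append((s[i:j].replace('~', '\x00'), int(s[j:k]) if j < k else 0))
--         i = k
--     return toks
--
--
-- def _compare_version_part(part1, part2):
--     t1 = _tokens(part1 or "")
--     t2 = _tokens(part2 or "")
--     if len(t1) < len(t2):
--         t1 = t1 + [("", 0)] * (len(t2) - len(t1))
--     else:
--         t2 = t2 + [("", 0)] * (len(t1) - len(t2))
--     for a, b in zip(t1, t2):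
--         if a < b:
--             return -1
--         if a > b:
--             return 1
--     return 0
-- ===== Notes on version B (the rewrite author's own statement) =====
-- stated objective: alternative
-- what changed: Replaces A's interleaved two-pointer scan (comparing runs of both strings while walking them in lockstep) by a build-then-compare decomposition: each part is first fully tokenized into (tilde-normalized non-digit run, digit-run value) tokens, the shorter token list is padded with ('',0), and the two aligned lists are compared positionally.
import Mathlib
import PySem

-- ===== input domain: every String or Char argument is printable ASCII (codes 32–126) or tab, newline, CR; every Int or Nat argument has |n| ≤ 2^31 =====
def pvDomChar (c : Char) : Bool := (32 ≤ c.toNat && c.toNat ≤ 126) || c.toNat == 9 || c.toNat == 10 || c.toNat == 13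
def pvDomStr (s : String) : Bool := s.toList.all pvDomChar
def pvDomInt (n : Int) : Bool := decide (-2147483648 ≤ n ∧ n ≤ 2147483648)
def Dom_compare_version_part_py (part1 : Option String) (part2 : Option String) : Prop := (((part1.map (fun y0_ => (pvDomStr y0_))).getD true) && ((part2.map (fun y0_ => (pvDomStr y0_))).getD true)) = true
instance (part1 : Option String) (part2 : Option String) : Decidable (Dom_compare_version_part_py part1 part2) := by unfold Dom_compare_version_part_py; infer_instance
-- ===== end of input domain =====

-- B replaces A's interleaved single-pass scan by a build-then-compare decomposition
-- (tokenize each part into (non-digit, number) tokens, pad, compare positionally); objective: alternative.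

-- shared primitive meanings (used by both ports, exact renderings of the Python expressions)
-- '.replace("~", "\x00")' on a run of characters
def pvTilde (l : List Char) : List Char := l.map (fun c => if c = '~' then Char.ofNat 0 else c)
-- 'int(s) if s else 0' for a run of ASCII digits
def pvDigitsVal (l : List Char) : Int := l.foldl (fun a c => a * 10 + ((c.toNat : Int) - 48)) 0

-- termination helper for both scanning recursions (cited by name in decreasing_by)
theorem pvDrop2_le (l : List Char) :
    ((l.dropWhile (fun c => !PySem.Chars.isdigit c)).dropWhile PySem.Chars.isdigit).length ≤ l.length :=
  le_trans (List.length_dropWhile_le _ _) (List.length_dropWhile_le _ _)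

theorem pvDrop2_lt (l : List Char) (h : l ≠ []) :
    ((l.dropWhile (fun c => !PySem.Chars.isdigit c)).dropWhile PySem.Chars.isdigit).length < l.length := by
  cases l with
  | nil => exact absurd rfl h
  | cons c t =>
    by_cases hd : PySem.Chars.isdigit c
    · simp [List.dropWhile, hd]
      exact List.length_dropWhile_le _ _
    · simp only [List.dropWhile, hd, Bool.not_false]
      exact Nat.lt_succ_of_le (le_trans (List.length_dropWhile_le _ _) (List.length_dropWhile_le _ _))

-- ===== PORT A =====
-- A's while-loop: in each round take the non-digit runs of both suffixes, compare them
-- (with '~' -> '\x00') lexicographically, then the digit runs numerically, then continue.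
def pvLoopA (l1 l2 : List Char) : Int :=
  if hne : l1 = [] ∧ l2 = [] then 0
  else
    let s1 := l1.takeWhile (fun c => !PySem.Chars.isdigit c)
    let r1 := l1.dropWhile (fun c => !PySem.Chars.isdigit c)
    let s2 := l2.takeWhile (fun c => !PySem.Chars.isdigit c)
    let r2 := l2.dropWhile (fun c => !PySem.Chars.isdigit c)
    if pvTilde s1 < pvTilde s2 then -1
    else if pvTilde s2 < pvTilde s1 then 1
    else
      let d1 := r1.takeWhile PySem.Chars.isdigit
      let m1 := r1.dropWhile PySem.Chars.isdigit
      let d2 := r2.takeWhile PySem.Chars.isdigit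
      let m2 := r2.dropWhile PySem.Chars.isdigit
      if pvDigitsVal d1 < pvDigitsVal d2 then -1
      else if pvDigitsVal d2 < pvDigitsVal d1 then 1
      else pvLoopA m1 m2
termination_by l1.length + l2.length
decreasing_by
  rcases not_and_or.mp hne with h | h
  · exact Nat.add_lt_add_of_lt_of_le (pvDrop2_lt l1 h) (pvDrop2_le l2)
  · exact Nat.add_lt_add_of_le_of_lt (pvDrop2_le l1) (pvDrop2_lt l2 h)

def compare_version_part_py (part1 : Option String) (part2 : Option String) : Int :=
  pvLoopA (part1.getD "").toList (part2.getD "").toList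

-- ===== PORT B =====
-- Source B's _tokens: scan the whole string once into (non-digit run with '~'->'\x00', digit-run value) tokens
def pvTokens (l : List Char) : List (List Char × Int) :=
  if hne : l = [] then []
  else
    let s := l.takeWhile (fun c => !PySem.Chars.isdigit c)
    let r := l.dropWhile (fun c => !PySem.Chars.isdigit c)
    let d := r.takeWhile PySem.Chars.isdigit
    let m := r.dropWhile PySem.Chars.isdigit
    (pvTilde s, pvDigitsVal d) :: pvTokens m
termination_by l.length
decreasing_by exact pvDrop2_lt l hne

-- Source B's padding: ts + [("", 0)] * k
def pvPad (ts : List (List Char × Int)) (n : Nat) : List (List Char × Int) :=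
  ts ++ List.replicate (n - ts.length) ([], 0)

-- Source B's for-loop over zip(t1, t2); Python's tuple 'a < b' / 'a > b' is rendered as the
-- equivalent component chain (string part first, then the number), exact under trichotomy of '<'
def pvCmpLoop (ps : List ((List Char × Int) × (List Char × Int))) : Int :=
  match ps with
  | [] => 0
  | (a, b) :: rest =>
    if a.1 < b.1 then -1
    else if b.1 < a.1 then 1
    else if a.2 < b.2 then -1
    else if b.2 < a.2 then 1
    else pvCmpLoop rest

def compare_version_part_py_alt (part1 : Option String) (part2 : Option String) : Int :=
  let t1 := pvTokens (part1.getD "").toList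
  let t2 := pvTokens (part2.getD "").toList
  let n := max t1.length t2.length
  pvCmpLoop ((pvPad t1 n).zip (pvPad t2 n))

-- ===== PRECONDITION & SPEC =====
def Spec_compare_version_part_py (part1 : Option String) (part2 : Option String) (out : Int) : Prop := out = compare_version_part_py_alt part1 part2
instance (part1 : Option String) (part2 : Option String) (out : Int) : Decidable (Spec_compare_version_part_py part1 part2 out) := by unfold Spec_compare_version_part_py; infer_instance

-- ===== CLAIM (what is proved, stated in full; the proofs are below) =====
def Claim_equal_compare_version_part_py : Prop := ∀ (part1 : Option String) (part2 : Option String), Dom_compare_version_part_py part1 part2 → Spec_compare_version_part_py part1 part2 (compare_version_part_py part1 part2)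

-- ===== LEMMAS AND PROOFS =====

-- the padded positional comparison, as a function of the two raw token lists
def pvCmpPad (t1 t2 : List (List Char × Int)) : Int :=
  pvCmpLoop ((pvPad t1 (max t1.length t2.length)).zip (pvPad t2 (max t1.length t2.length)))

theorem pvCmpPad_nil_nil : pvCmpPad [] [] = 0 := rfl

theorem pvPad_zip_cons (a b : List Char × Int) (r1 r2 : List (List Char × Int)) :
    (pvPad (a :: r1) (max (a :: r1).length (b :: r2).length)).zip
      (pvPad (b :: r2) (max (a :: r1).length (b :: r2).length)) =
    (a, b) :: (pvPad r1 (max r1.length r2.length)).zip (pvPad r2 (max r1.length r2.length)) := by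
  simp [pvPad, List.length_cons, Nat.succ_max_succ, Nat.succ_sub_succ]

theorem pvCmpPad_cons_cons (a b : List Char × Int) (r1 r2 : List (List Char × Int)) :
    pvCmpPad (a :: r1) (b :: r2) =
      (if a.1 < b.1 then -1 else if b.1 < a.1 then 1
       else if a.2 < b.2 then -1 else if b.2 < a.2 then 1 else pvCmpPad r1 r2) := by
  unfold pvCmpPad
  rw [pvPad_zip_cons]
  rfl

theorem pvCmpPad_cons_nil (a : List Char × Int) (r1 : List (List Char × Int)) :
    pvCmpPad (a :: r1) [] =
      (if a.1 < ([] : List Char) then -1 else if ([] : List Char) < a.1 then 1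
       else if a.2 < (0 : Int) then -1 else if (0 : Int) < a.2 then 1 else pvCmpPad r1 []) := by
  unfold pvCmpPad pvPad
  simp [List.replicate_succ, pvCmpLoop]

theorem pvCmpPad_nil_cons (b : List Char × Int) (r2 : List (List Char × Int)) :
    pvCmpPad [] (b :: r2) =
      (if ([] : List Char) < b.1 then -1 else if b.1 < ([] : List Char) then 1
       else if (0 : Int) < b.2 then -1 else if b.2 < (0 : Int) then 1 else pvCmpPad [] r2) := by
  unfold pvCmpPad pvPad
  simp [List.replicate_succ, pvCmpLoop]

theorem pvTokens_nil : pvTokens [] = [] := by simp [pvTokens]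

theorem pvTokens_ne (l : List Char) (h : l ≠ []) :
    pvTokens l =
      (pvTilde (l.takeWhile (fun c => !PySem.Chars.isdigit c)),
       pvDigitsVal ((l.dropWhile (fun c => !PySem.Chars.isdigit c)).takeWhile PySem.Chars.isdigit)) ::
      pvTokens ((l.dropWhile (fun c => !PySem.Chars.isdigit c)).dropWhile PySem.Chars.isdigit) := by
  rw [pvTokens]
  simp [h]

-- main invariant: A's interleaved loop equals B's tokenize-pad-compare
theorem pvMain (l1 l2 : List Char) : pvLoopA l1 l2 = pvCmpPad (pvTokens l1) (pvTokens l2) := by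
  by_cases h : l1 = [] ∧ l2 = []
  · obtain ⟨h1, h2⟩ := h
    subst h1; subst h2
    simp [pvLoopA, pvTokens_nil, pvCmpPad_nil_nil]
  · rw [pvLoopA]
    rw [dif_neg h]
    by_cases h1 : l1 = []
    · -- l2 ≠ []
      have h2 : l2 ≠ [] := fun h2 => h ⟨h1, h2⟩
      subst h1
      rw [pvTokens_nil, pvTokens_ne l2 h2, pvCmpPad_nil_cons]
      simp only [List.takeWhile_nil, List.dropWhile_nil]
      have ih := pvMain ([] : List Char) ((l2.dropWhile (fun c => !PySem.Chars.isdigit c)).dropWhile PySem.Chars.isdigit)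
      rw [pvTokens_nil] at ih
      simp only [pvTilde, List.map_nil, pvDigitsVal, List.foldl_nil]
      rw [← ih]
      rfl
    · by_cases h2 : l2 = []
      · subst h2
        rw [pvTokens_nil, pvTokens_ne l1 h1, pvCmpPad_cons_nil]
        simp only [List.takeWhile_nil, List.dropWhile_nil]
        have ih := pvMain ((l1.dropWhile (fun c => !PySem.Chars.isdigit c)).dropWhile PySem.Chars.isdigit) ([] : List Char)
        rw [pvTokens_nil] at ih
        simp only [pvTilde, List.map_nil, pvDigitsVal, List.foldl_nil]
        rw [← ih]
        rfl
      · rw [pvTokens_ne l1 h1, pvTokens_ne l2 h2, pvCmpPad_cons_cons]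
        have ih := pvMain ((l1.dropWhile (fun c => !PySem.Chars.isdigit c)).dropWhile PySem.Chars.isdigit)
                          ((l2.dropWhile (fun c => !PySem.Chars.isdigit c)).dropWhile PySem.Chars.isdigit)
        rw [← ih]
termination_by l1.length + l2.length
decreasing_by
  · exact Nat.add_lt_add_of_le_of_lt (by simp) (pvDrop2_lt l2 h2)
  · exact Nat.add_lt_add_of_lt_of_le (pvDrop2_lt l1 h1) (by simp)
  · exact Nat.add_lt_add_of_lt_of_le (pvDrop2_lt l1 h1) (pvDrop2_le l2)

-- ===== VERDICT (by name: the statement is the Claim_ definition above) =====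
theorem compare_version_part_py_spec : Claim_equal_compare_version_part_py := by
  intro part1 part2 _
  unfold Spec_compare_version_part_py compare_version_part_py compare_version_part_py_alt
  exact pvMain _ _
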